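-- pv_equiv track=rewrite | github.com/classskipper351/zb_ringmo | dp_schedule.py | find_successors
-- ===== SOURCE A (Python) =====
-- from collections import defaultdict, deque
--
-- def is_valid_state(sequences, nmb, nstages, ignore_w=False):
--     """验证当前序列是否合法"""
--     if len(sequences) != nstages:
--         return False
--     for seq in sequences:
--         try:
--             # 根据 ignore_w 设置最大序列长度
--             max_len = nmb * (2 if ignore_w else 3)
--             assert len(seq) <= max_len
--             # 检查操作类型
--             valid_ops = ['f', 'b'] if ignore_w else ['f', 'b', 'w']
--             for op in seq:
--                 assert op in valid_ops, "包含非法操作"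
--             # 检查 F 和 B 的计数
--             for op in ['f', 'b']:
--                 assert seq.count(op) <= nmb
--             # 如果不忽略 W，检查 W 的计数
--             if not ignore_w:
--                 assert seq.count('w') <= nmb
--             # 检查 F -> B -> W 依赖
--             F_stack = deque()
--             B_stack = deque()
--             for op in seq:
--                 if op == 'f':
--                     F_stack.append(op)
--                 elif op == 'b':
--                     assert F_stack, "B 操作前必须有 F"
--                     B_stack.append(op)
--                     F_stack.pop()
--                 elif op == 'w' and not ignore_w:
--                     assert B_stack, "W 操作前必须有 B"
--                     B_stack.pop()
--         except AssertionError: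
--             return False
--     for stage in range(nstages - 1):
--         prev_seq = sequences[stage]
--         succ_seq = sequences[stage + 1]
--         try:
--             assert prev_seq.count('f') >= succ_seq.count('f')
--             assert prev_seq.count('b') <= succ_seq.count('b')
--         except AssertionError:
--             return False
--     return True
--
-- def find_successors(sequences, nmb, nstages, ignore_w=False):
--     """生成当前序列的所有合法后继"""
--     successors = []
--     for stage in range(nstages):
--         # 根据 ignore_w 设置可添加的操作
--         ops = ['f', 'b'] if ignore_w else ['f', 'b', 'w']
--         for op in ops:
--             new_seq = [list(s) for s in sequences]
--             new_seq[stage].append(op)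
--             new_seq_str = [''.join(s) for s in new_seq]
--             if is_valid_state(new_seq_str, nmb, nstages, ignore_w):
--                 successors.append(new_seq_str)
--     return successors
-- ===== SOURCE B (Python) =====
-- def find_successors(sequences, nmb, nstages, ignore_w=False):
--     """Generate all valid successors by validating each stage once and checking
--     each candidate incrementally (only the modified stage and its two adjacent
--     count constraints), instead of re-validating the whole state per candidate."""
--     n = len(sequences)
--     if n != nstages:
--         return []
--     max_len = nmb * (2 if ignore_w else 3)
--     valid_ops = 'fb' if ignore_w else 'fbw'
--     info = []
--     for s in sequences:
--         cf = s.count('f')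
--         cb = s.count('b')
--         cw = s.count('w')
--         chars_ok = all(c in valid_ops for c in s)
--         f = 0
--         b = 0
--         dep = True
--         for c in s:
--             if c == 'f':
--                 f += 1
--             elif c == 'b':
--                 if f == 0:
--                     dep = False
--                     break
--                 f -= 1
--                 b += 1
--             elif c == 'w' and not ignore_w:
--                 if b == 0:
--                     dep = False
--                     break
--                 b -= 1
--         info.append((len(s), cf, cb, cw, chars_ok, dep, f, b))
--
--     def base_ok(t):
--         l, cf, cb, cw, chars_ok, dep, f, b = t
--         return (l <= max_len and chars_ok and cf <= nmb and cb <= nmb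
--                 and (ignore_w or cw <= nmb) and dep)
--
--     # okP[i] = all stages < i are individually valid; okS[i] = all stages >= i are
--     okP = [True]
--     for t in info:
--         okP.append(okP[-1] and base_ok(t))
--     okS_rev = [True]
--     for t in reversed(info):
--         okS_rev.append(okS_rev[-1] and base_ok(t))
--     okS = okS_rev[::-1]
--
--     # adj[j] = count constraint between stages j and j+1 holds in the base state
--     adj = [p[1] >= q[1] and p[2] <= q[2] for p, q in zip(info, info[1:])]
--     adjP = [True]
--     for a in adj:
--         adjP.append(adjP[-1] and a)
--     adjS_rev = [True]
--     for a in reversed(adj):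
--         adjS_rev.append(adjS_rev[-1] and a)
--     adjS = adjS_rev[::-1] + [True]
--
--     ops = ['f', 'b'] if ignore_w else ['f', 'b', 'w']
--     successors = []
--     for i in range(n):
--         l, cf, cb, cw, chars_ok, dep, f, b = info[i]
--         # parts of the state the appended op cannot fix
--         if not (okP[i] and okS[i + 1] and chars_ok and dep):
--             continue
--         if not (adjP[max(i - 1, 0)] and adjS[i + 1]):
--             continue
--         for op in ops:
--             ncf = cf + (op == 'f')
--             ncb = cb + (op == 'b')
--             ncw = cw + (op == 'w')
--             if l + 1 > max_len:
--                 continue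
--             if ncf > nmb or ncb > nmb or (not ignore_w and ncw > nmb):
--                 continue
--             if op == 'b' and f == 0:
--                 continue
--             if op == 'w' and b == 0:
--                 continue
--             if i > 0 and not (info[i - 1][1] >= ncf and info[i - 1][2] <= ncb):
--                 continue
--             if i + 1 < n and not (ncf >= info[i + 1][1] and ncb <= info[i + 1][2]):
--                 continue
--             successors.append(sequences[:i] + [sequences[i] + op] + sequences[i + 1:])
--     return successors
-- ===== Notes on version B (the rewrite author's own statement) =====
-- stated objective: faster
-- what changed: A re-validates the entire state (every stage and every adjacent pair) for each of the nstages*|ops| candidates; B validates each stage once (counts, character set, length, F/B/W stack feasibility), precomputes prefix/suffix validity and adjacency arrays, and accepts a candidate by O(1) incremental checks on the modified stage and its two adjacent pairs.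
import Mathlib
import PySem

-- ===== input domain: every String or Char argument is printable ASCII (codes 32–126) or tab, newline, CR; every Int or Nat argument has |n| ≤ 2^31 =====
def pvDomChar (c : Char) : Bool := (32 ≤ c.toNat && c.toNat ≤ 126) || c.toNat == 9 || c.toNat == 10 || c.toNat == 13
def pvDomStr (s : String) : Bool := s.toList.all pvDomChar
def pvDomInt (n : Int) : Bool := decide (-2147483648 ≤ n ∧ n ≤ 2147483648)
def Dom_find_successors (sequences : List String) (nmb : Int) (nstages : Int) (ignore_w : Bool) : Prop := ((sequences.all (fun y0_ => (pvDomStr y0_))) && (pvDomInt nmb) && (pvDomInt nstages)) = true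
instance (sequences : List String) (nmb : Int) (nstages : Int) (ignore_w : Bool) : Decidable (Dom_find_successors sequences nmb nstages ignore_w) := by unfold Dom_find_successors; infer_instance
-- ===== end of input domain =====

-- B validates each stage once and checks candidates incrementally (modified stage + its two
-- adjacent count constraints) instead of re-validating the whole state per candidate (objective: faster).

-- ===== PORT A =====
-- the F_stack/B_stack loop of is_valid_state (deque.append / deque.pop at the right end);
-- an AssertionError inside the loop is the sticky `false` in the third component
def pvA_stackStep (ignore_w : Bool) (st : List Char × List Char × Bool) (op : Char) : List Char × List Char × Bool :=
  if st.2.2 = false then st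
  else if op = 'f' then (st.1 ++ [op], st.2.1, st.2.2)
  else if op = 'b' then
    (if st.1 = [] then (st.1, st.2.1, false) else (st.1.dropLast, st.2.1 ++ [op], st.2.2))
  else if op = 'w' && !ignore_w then
    (if st.2.1 = [] then (st.1, st.2.1, false) else (st.1, st.2.1.dropLast, st.2.2))
  else st

-- the per-sequence try/except block of is_valid_state (&& short-circuits like the asserts;
-- the `for op in ['f','b']` count loop is unrolled into its two iterations)
def pvA_seqValid (nmb : Int) (ignore_w : Bool) (s : List Char) : Bool :=
  let max_len : Int := nmb * (if ignore_w then 2 else 3)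
  let valid_ops : List Char := if ignore_w then ['f', 'b'] else ['f', 'b', 'w']
  decide ((s.length : Int) ≤ max_len) &&
  s.all (fun op => valid_ops.contains op) &&
  decide ((s.count 'f' : Int) ≤ nmb) && decide ((s.count 'b' : Int) ≤ nmb) &&
  (ignore_w || decide ((s.count 'w' : Int) ≤ nmb)) &&
  (s.foldl (pvA_stackStep ignore_w) ([], [], true)).2.2

-- is_valid_state
def pvA_isValid (seqs : List String) (nmb : Int) (nstages : Int) (ignore_w : Bool) : Bool :=
  if (seqs.length : Int) ≠ nstages then false
  else
    seqs.all (fun s => pvA_seqValid nmb ignore_w s.toList) &&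
    (PySem.List.pyRange 0 (nstages - 1) 1).all (fun stage =>
      let prev_seq := PySem.List.pyGetD seqs stage ""
      let succ_seq := PySem.List.pyGetD seqs (stage + 1) ""
      decide ((succ_seq.toList.count 'f' : Int) ≤ (prev_seq.toList.count 'f' : Int)) &&
      decide ((prev_seq.toList.count 'b' : Int) ≤ (succ_seq.toList.count 'b' : Int)))

def find_successors (sequences : List String) (nmb : Int) (nstages : Int) (ignore_w : Bool) : List (List String) :=
  let ops : List Char := if ignore_w then ['f', 'b'] else ['f', 'b', 'w']
  (PySem.List.pyRange 0 nstages 1).foldl (fun successors stage =>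
    ops.foldl (fun successors op =>
      -- new_seq = [list(s) for s in sequences]; new_seq[stage].append(op)
      let new_seq : List (List Char) := sequences.map String.toList
      let new_seq := PySem.List.pySetD new_seq stage (PySem.List.pyGetD new_seq stage [] ++ [op])
      -- new_seq_str = [''.join(s) for s in new_seq]
      let new_seq_str := new_seq.map (fun l => String.ofList l)
      if pvA_isValid new_seq_str nmb nstages ignore_w then successors ++ [new_seq_str]
      else successors) successors) []

-- ===== PORT B =====
structure PvInfo where
  len : Nat
  cf : Nat
  cb : Nat
  cw : Nat
  charsOk : Bool
  dep : Bool
  f : Nat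
  b : Nat
deriving DecidableEq, Repr, Inhabited

-- Source B's dependency-counter loop (break = sticky `false` in the third component)
def pvB_depStep (ignore_w : Bool) (st : Nat × Nat × Bool) (c : Char) : Nat × Nat × Bool :=
  if st.2.2 = false then st
  else if c = 'f' then (st.1 + 1, st.2.1, st.2.2)
  else if c = 'b' then
    (if st.1 = 0 then (st.1, st.2.1, false) else (st.1 - 1, st.2.1 + 1, st.2.2))
  else if c = 'w' && !ignore_w then
    (if st.2.1 = 0 then (st.1, st.2.1, false) else (st.1, st.2.1 - 1, st.2.2))
  else st

-- one entry of Source B's `info` list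
def pvB_info (ignore_w : Bool) (s : List Char) : PvInfo :=
  let st := s.foldl (pvB_depStep ignore_w) (0, 0, true)
  { len := s.length, cf := s.count 'f', cb := s.count 'b', cw := s.count 'w',
    charsOk := s.all (fun c => (if ignore_w then ['f', 'b'] else ['f', 'b', 'w']).contains c),
    dep := st.2.2, f := st.1, b := st.2.1 }

-- Source B's base_ok
def pvB_baseOk (nmb : Int) (ignore_w : Bool) (t : PvInfo) : Bool :=
  decide ((t.len : Int) ≤ nmb * (if ignore_w then 2 else 3)) && t.charsOk &&
  decide ((t.cf : Int) ≤ nmb) && decide ((t.cb : Int) ≤ nmb) &&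
  (ignore_w || decide ((t.cw : Int) ≤ nmb)) && t.dep

def find_successors_alt (sequences : List String) (nmb : Int) (nstages : Int) (ignore_w : Bool) : List (List String) :=
  let n := sequences.length
  if (n : Int) ≠ nstages then [] else
  let infos := sequences.map (fun s => pvB_info ignore_w s.toList)
  -- prefix/suffix "all stages individually valid" arrays (the okP / okS loops)
  let okP := List.scanl (fun a t => a && pvB_baseOk nmb ignore_w t) true infos
  let okS := (List.scanl (fun a t => a && pvB_baseOk nmb ignore_w t) true infos.reverse).reverse
  -- adjacency of the base state and its prefix/suffix arrays
  let adj := List.zipWith (fun p q : PvInfo => decide ((q.cf : Int) ≤ (p.cf : Int)) && decide ((p.cb : Int) ≤ (q.cb : Int))) infos infos.tail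
  let adjP := List.scanl (fun a x => a && x) true adj
  let adjS := (List.scanl (fun a x => a && x) true adj.reverse).reverse ++ [true]
  let ops : List Char := if ignore_w then ['f', 'b'] else ['f', 'b', 'w']
  (List.range n).foldl (fun successors i =>
    let t := infos.getD i default
    -- parts of the state the appended op cannot fix (the two stage-level `continue`s)
    if !(okP.getD i true && okS.getD (i + 1) true && t.charsOk && t.dep) then successors
    else if !(adjP.getD (i - 1) true && adjS.getD (i + 1) true) then successors
    else successors ++ (ops.filterMap (fun op =>
      let ncf : Int := (t.cf : Int) + (if op = 'f' then 1 else 0)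
      let ncb : Int := (t.cb : Int) + (if op = 'b' then 1 else 0)
      let ncw : Int := (t.cw : Int) + (if op = 'w' then 1 else 0)
      if decide ((t.len : Int) + 1 > nmb * (if ignore_w then 2 else 3)) then none
      else if (decide (ncf > nmb) || decide (ncb > nmb) || (!ignore_w && decide (ncw > nmb))) then none
      else if (op = 'b' && t.f == 0) then none
      else if (op = 'w' && t.b == 0) then none
      else if (0 < i && !(decide (ncf ≤ ((infos.getD (i - 1) default).cf : Int)) && decide (((infos.getD (i - 1) default).cb : Int) ≤ ncb))) then none
      else if (i + 1 < n && !(decide (((infos.getD (i + 1) default).cf : Int) ≤ ncf) && decide (ncb ≤ ((infos.getD (i + 1) default).cb : Int)))) then none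
      else some (sequences.take i ++ [(sequences.getD i "").push op] ++ sequences.drop (i + 1))))) []

-- ===== PRECONDITION & SPEC =====
-- Pre_ excludes exactly the inputs where A raises IndexError: nstages > len(sequences)
-- (then new_seq[stage] is evaluated for stage = len(sequences)).
def Pre_find_successors (sequences : List String) (nmb : Int) (nstages : Int) (ignore_w : Bool) : Prop :=
  nstages ≤ (sequences.length : Int)
instance (sequences : List String) (nmb : Int) (nstages : Int) (ignore_w : Bool) : Decidable (Pre_find_successors sequences nmb nstages ignore_w) := by unfold Pre_find_successors; infer_instance

def pvWitness_find_successors : List String × Int × Int × Bool := (["f", "fb"], 2, 2, false)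

def Spec_find_successors (sequences : List String) (nmb : Int) (nstages : Int) (ignore_w : Bool) (out : List (List String)) : Prop := out = find_successors_alt sequences nmb nstages ignore_w
instance (sequences : List String) (nmb : Int) (nstages : Int) (ignore_w : Bool) (out : List (List String)) : Decidable (Spec_find_successors sequences nmb nstages ignore_w out) := by unfold Spec_find_successors; infer_instance

-- ===== CLAIM (what is proved, stated in full; the proofs are below) =====
def Claim_equal_find_successors : Prop := ∀ (sequences : List String) (nmb : Int) (nstages : Int) (ignore_w : Bool), Dom_find_successors sequences nmb nstages ignore_w → Pre_find_successors sequences nmb nstages ignore_w → Spec_find_successors sequences nmb nstages ignore_w (find_successors sequences nmb nstages ignore_w)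
-- ===== LEMMAS AND PROOFS =====

-- fold a function that fixes the accumulator
theorem pv_foldl_fixed {α β : Type} (f : β → α → β) (l : List α) (a : β)
    (h : ∀ b x, x ∈ l → f b x = b) : l.foldl f a = a := by
  induction l generalizing a with
  | nil => rfl
  | cons x xs ih => simp only [List.foldl_cons, h a x (by simp)]
                    exact ih a (fun b y hy => h b y (by simp [hy]))

-- the two stack loops run in lock-step: booleans equal, deque lengths = counters
theorem pv_stack_rel (iw : Bool) (s : List Char) (F B : List Char) (ok : Bool) :
    ((s.foldl (pvA_stackStep iw) (F, B, ok)).1.length = (s.foldl (pvB_depStep iw) (F.length, B.length, ok)).1) ∧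
    ((s.foldl (pvA_stackStep iw) (F, B, ok)).2.1.length = (s.foldl (pvB_depStep iw) (F.length, B.length, ok)).2.1) ∧
    ((s.foldl (pvA_stackStep iw) (F, B, ok)).2.2 = (s.foldl (pvB_depStep iw) (F.length, B.length, ok)).2.2) := by
  induction s generalizing F B ok with
  | nil => simp
  | cons c s ih =>
    simp only [List.foldl_cons]
    cases ok with
    | false => simpa only [pvA_stackStep, pvB_depStep, if_pos rfl] using ih F B false
    | true =>
      by_cases hf : c = 'f'
      · subst hf
        simpa only [pvA_stackStep, pvB_depStep, if_pos rfl, if_neg (by decide : ¬ (true = false)),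
          List.length_append, List.length_cons, List.length_nil, Nat.zero_add] using ih (F ++ ['f']) B true
      · by_cases hb : c = 'b'
        · subst hb
          by_cases hF : F = []
          · have hl : F.length = 0 := by simp [hF]
            simpa only [pvA_stackStep, pvB_depStep, hF, hl, if_pos rfl,
              if_neg (by decide : ¬ (true = false)), if_neg (by decide : ¬ ('b' = 'f'))]
              using ih F B false
          · have hl : F.length ≠ 0 := by simpa using hF
            have h1 : F.dropLast.length = F.length - 1 := by simp
            have h2 : (B ++ ['b']).length = B.length + 1 := by simp
            simpa only [pvA_stackStep, pvB_depStep, if_neg hF, if_neg hl, if_pos rfl,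
              if_neg (by decide : ¬ (true = false)), if_neg (by decide : ¬ ('b' = 'f')),
              h1, h2] using ih F.dropLast (B ++ ['b']) true
        · by_cases hw : (c = 'w' ∧ iw = false)
          · obtain ⟨hc, hiw⟩ := hw
            subst hc; subst hiw
            by_cases hB : B = []
            · have hl : B.length = 0 := by simp [hB]
              simpa only [pvA_stackStep, pvB_depStep, hB, hl, if_pos rfl,
                if_neg (by decide : ¬ (true = false)), if_neg (by decide : ¬ ('w' = 'f')),
                if_neg (by decide : ¬ ('w' = 'b')), Bool.not_false, Bool.and_true,
                if_pos (rfl : ('w' : Char) = 'w')] using ih F B false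
            · have hl : B.length ≠ 0 := by simpa using hB
              have h1 : B.dropLast.length = B.length - 1 := by simp
              simpa only [pvA_stackStep, pvB_depStep, if_neg hB, if_neg hl,
                if_neg (by decide : ¬ (true = false)), if_neg (by decide : ¬ ('w' = 'f')),
                if_neg (by decide : ¬ ('w' = 'b')), Bool.not_false, Bool.and_true,
                if_pos (rfl : ('w' : Char) = 'w'), h1] using ih F B.dropLast true
          · have hg : (c = 'w' && !iw) = false := by
              cases iw <;> simp_all
            simpa only [pvA_stackStep, pvB_depStep, if_neg hf, if_neg hb, hg,
              if_neg (by decide : ¬ (true = false)), Bool.false_eq_true, if_neg (by simp : ¬ (false = true))]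
              using ih F B true

theorem pv_seqValid_eq_baseOk (nmb : Int) (iw : Bool) (s : List Char) :
    pvA_seqValid nmb iw s = pvB_baseOk nmb iw (pvB_info iw s) := by
  have h := pv_stack_rel iw s [] [] true
  simp only [List.length_nil] at h
  simp only [pvA_seqValid, pvB_baseOk, pvB_info, h.2.2]
  rfl


-- proof-side abbreviations
def pvOps (iw : Bool) : List Char := if iw then ['f', 'b'] else ['f', 'b', 'w']
def pvSeqOk (nmb : Int) (iw : Bool) (s : String) : Bool := pvA_seqValid nmb iw s.toList
def pvAdjB (p q : String) : Bool :=
  decide ((q.toList.count 'f' : Int) ≤ (p.toList.count 'f' : Int)) &&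
  decide ((p.toList.count 'b' : Int) ≤ (q.toList.count 'b' : Int))
-- the op-dependent part of B's candidate acceptance
def pvCandOk (nmb : Int) (iw : Bool) (t : PvInfo) (op : Char) : Bool :=
  !decide ((t.len : Int) + 1 > nmb * (if iw then 2 else 3)) &&
  !(decide ((t.cf : Int) + (if op = 'f' then 1 else 0) > nmb) ||
    decide ((t.cb : Int) + (if op = 'b' then 1 else 0) > nmb) ||
    (!iw && decide ((t.cw : Int) + (if op = 'w' then 1 else 0) > nmb))) &&
  !(op = 'b' && t.f == 0) && !(op = 'w' && t.b == 0)

theorem pv_scanl_getD {α : Type} (p : α → Bool) (l : List α) (i : Nat) (b : Bool) (h : i ≤ l.length) :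
    (List.scanl (fun a x => a && p x) b l).getD i true = (b && (l.take i).all p) := by
  induction l generalizing i b with
  | nil =>
    have hi : i = 0 := by simpa using h
    subst hi; simp [List.scanl]
  | cons x xs ih =>
    cases i with
    | zero => simp [List.scanl_cons]
    | succ j =>
      simp only [List.scanl_cons, List.getD_cons_succ, List.take_succ_cons, List.all_cons]
      rw [ih j (b && p x) (by simpa using h), Bool.and_assoc]

theorem pv_scanl_rev_getD {α : Type} (p : α → Bool) (l : List α) (i : Nat) (h : i ≤ l.length) :
    ((List.scanl (fun a x => a && p x) true l.reverse).reverse).getD i true = (l.drop i).all p := by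
  have hlen : (List.scanl (fun a x => a && p x) true l.reverse).length = l.length + 1 := by
    simp [List.length_scanl]
  have hi : i < (List.scanl (fun a x => a && p x) true l.reverse).reverse.length := by
    simp [hlen]; omega
  rw [List.getD_eq_getElem _ _ hi, List.getElem_reverse]
  have h2 : l.length + 1 - 1 - i = l.length - i := by omega
  rw [← List.getD_eq_getElem _ true]
  simp only [hlen, h2]
  have h5 : l.length - i ≤ l.reverse.length := by
    rw [List.length_reverse]; omega
  rw [pv_scanl_getD p l.reverse (l.length - i) true h5, Bool.true_and]
  rw [List.take_reverse]
  have h4 : l.length - (l.length - i) = i := by omega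
  rw [h4, List.all_reverse]

theorem pv_all_take_iff {α : Type} (l : List α) (p : α → Bool) (k : Nat) :
    ((l.take k).all p = true) ↔ ∀ j (hj : j < l.length), j < k → p l[j] = true := by
  rw [List.all_eq_true]
  constructor
  · intro hall j hj hjk
    exact hall l[j] (List.mem_take_iff_getElem.mpr ⟨j, by omega, by simp⟩)
  · intro hidx x hx
    obtain ⟨j, hj, hx⟩ := List.mem_take_iff_getElem.mp hx
    subst hx; exact hidx j (by omega) (by omega)

theorem pv_all_drop_iff {α : Type} (l : List α) (p : α → Bool) (k : Nat) :
    ((l.drop k).all p = true) ↔ ∀ j (hj : j < l.length), k ≤ j → p l[j] = true := by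
  rw [List.all_eq_true]
  constructor
  · intro hall j hj hjk
    have : l[j] = (l.drop k)[j - k]'(by simp; omega) := by
      rw [List.getElem_drop]; congr 1; omega
    rw [this]; exact hall _ (List.getElem_mem _)
  · intro hidx x hx
    obtain ⟨j, hj, hx⟩ := List.mem_drop_iff_getElem.mp hx
    subst hx
    exact hidx (k + j) (by omega) (by omega)

theorem pv_filterMap_ite {α β : Type} (l : List α) (c : α → Bool) (f : α → β) :
    l.filterMap (fun x => if c x then some (f x) else none) = (l.filter c).map f := by
  induction l with
  | nil => rfl
  | cons x xs ih => by_cases h : c x <;> simp [h, ih]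


-- appending op to a sequence: the final stack flag in terms of B's counters
theorem pv_stack_last (iw : Bool) (t : List Char) (op : Char) (hop : op ∈ pvOps iw) :
    (pvA_stackStep iw (t.foldl (pvA_stackStep iw) ([], [], true)) op).2.2 =
      ((t.foldl (pvB_depStep iw) (0, 0, true)).2.2 &&
       !(op = 'b' && (t.foldl (pvB_depStep iw) (0, 0, true)).1 == 0) &&
       !(op = 'w' && (t.foldl (pvB_depStep iw) (0, 0, true)).2.1 == 0)) := by
  obtain ⟨h1, h2, h3⟩ := pv_stack_rel iw t [] [] true
  simp only [List.length_nil] at h1 h2 h3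
  set stA := t.foldl (pvA_stackStep iw) ([], [], true) with hA
  set stB := t.foldl (pvB_depStep iw) ((0 : Nat), (0 : Nat), true) with hB
  by_cases hok : stA.2.2 = false
  · simp [pvA_stackStep, hok, ← h3]
  · have hokt : stA.2.2 = true := by revert hok; cases stA.2.2 <;> simp
    have hBt : stB.2.2 = true := h3 ▸ hokt
    have hFe : (stA.1 = []) ↔ (stB.1 = 0) := by
      rw [← h1]; simp [List.length_eq_zero_iff]
    have hBe : (stA.2.1 = []) ↔ (stB.2.1 = 0) := by
      rw [← h2]; simp [List.length_eq_zero_iff]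
    by_cases hf : op = 'f'
    · subst hf; simp [pvA_stackStep, hokt, hBt]
    · by_cases hb : op = 'b'
      · subst hb
        by_cases hF : stA.1 = []
        · have h0 : stB.1 = 0 := hFe.mp hF
          simp [pvA_stackStep, hokt, hBt, hF, h0]
        · have h0 : ¬ stB.1 = 0 := fun hh => hF (hFe.mpr hh)
          simp [pvA_stackStep, hokt, hBt, hF, h0]
      · by_cases hw : op = 'w'
        · subst hw
          have hiw : iw = false := by
            cases iw
            · rfl
            · simp [pvOps] at hop
          subst hiw
          by_cases hBemp : stA.2.1 = []
          · have h0 : stB.2.1 = 0 := hBe.mp hBemp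
            simp [pvA_stackStep, hokt, hBt, hBemp, h0]
          · have h0 : ¬ stB.2.1 = 0 := fun hh => hBemp (hBe.mpr hh)
            simp [pvA_stackStep, hokt, hBt, hBemp, h0]
        · have hops : op = 'f' ∨ op = 'b' ∨ op = 'w' := by
            cases iw <;> simp [pvOps] at hop <;> tauto
          exfalso; tauto

-- appending op ∈ ops to a sequence: A's full revalidation = B's incremental conditions
theorem pv_seqValid_append (nmb : Int) (iw : Bool) (t : List Char) (op : Char) (hop : op ∈ pvOps iw) :
    pvA_seqValid nmb iw (t ++ [op]) =
      ((pvB_info iw t).charsOk && (pvB_info iw t).dep && pvCandOk nmb iw (pvB_info iw t) op) := by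
  have hst := pv_stack_last iw t op hop
  have hcontains : (if iw then ['f', 'b'] else ['f', 'b', 'w']).contains op = true := by
    cases iw with
    | true => simp [pvOps] at hop; rcases hop with h | h <;> simp [h]
    | false => simp [pvOps] at hop; rcases hop with h | h | h <;> simp [h]
  unfold pvA_seqValid pvCandOk pvB_info
  simp only [List.foldl_append, List.foldl_cons, List.foldl_nil] at hst ⊢
  rw [hst]
  rw [Bool.eq_iff_iff]
  simp only [List.length_append, List.all_append, List.all_cons, List.all_nil, List.count_append,
    List.count_singleton', List.length_cons, List.length_nil, hcontains,
    Bool.and_eq_true, Bool.or_eq_true, Bool.not_eq_true', Bool.and_eq_false_iff,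
    decide_eq_true_eq, decide_eq_false_iff_not, not_lt, beq_iff_eq, Bool.not_eq_true,
    Bool.or_eq_false_iff, Bool.not_eq_false', Bool.and_true, Bool.true_and]
  push_cast [apply_ite (fun n : Nat => (n : Int))]
  tauto


-- A's is_valid_state on a single-stage modification, decomposed
theorem pv_valid_iff (seqs : List String) (nmb : Int) (iw : Bool) (i : Nat)
    (hi : i < seqs.length) (x : String) :
    (pvA_isValid (seqs.set i x) nmb (seqs.length : Int) iw = true) ↔
      ((seqs.take i).all (pvSeqOk nmb iw) = true ∧
       (seqs.drop (i + 1)).all (pvSeqOk nmb iw) = true ∧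
       pvSeqOk nmb iw x = true ∧
       (∀ j, j + 1 < seqs.length →
          pvAdjB ((seqs.set i x).getD j "") ((seqs.set i x).getD (j + 1) "") = true)) := by
  have hlen : (seqs.set i x).length = seqs.length := by simp
  have hset : seqs.set i x = seqs.take i ++ x :: seqs.drop (i + 1) := List.set_eq_take_cons_drop x hi
  unfold pvA_isValid
  rw [hlen, if_neg (by simp)]
  have hc : ((seqs.length : Int) - 1) = ((seqs.length - 1 : Nat) : Int) := by omega
  rw [hc, PySem.List.pyRange_zero_nat]
  rw [Bool.and_eq_true, List.all_map, List.all_eq_true, List.all_eq_true]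
  constructor
  · rintro ⟨hall, hchain⟩
    refine ⟨?_, ?_, ?_, ?_⟩
    · rw [List.all_eq_true]
      intro y hy
      exact hall y (by rw [hset]; exact List.mem_append_left _ hy)
    · rw [List.all_eq_true]
      intro y hy
      exact hall y (by rw [hset]; exact List.mem_append_right _ (List.mem_cons_of_mem _ hy))
    · exact hall x (by rw [hset]; exact List.mem_append_right _ (List.mem_cons_self))
    · intro j hj
      have hjm : j ∈ List.range (seqs.length - 1) := by
        rw [List.mem_range]; omega
      have h5 := hchain j hjm
      simp only [Function.comp] at h5
      rw [show ((j : Int) + 1) = ((j + 1 : Nat) : Int) by push_cast; ring] at h5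
      rw [PySem.List.pyGetD_natCast, PySem.List.pyGetD_natCast] at h5
      simpa [pvAdjB] using h5
  · rintro ⟨h1, h2, h3, h4⟩
    constructor
    · intro y hy
      rw [hset] at hy
      rcases List.mem_append.mp hy with hy | hy
      · exact (List.all_eq_true.mp h1) y hy
      · rcases List.mem_cons.mp hy with hy | hy
        · subst hy; exact h3
        · exact (List.all_eq_true.mp h2) y hy
    · intro j hjm
      rw [List.mem_range] at hjm
      simp only [Function.comp]
      rw [show ((j : Int) + 1) = ((j + 1 : Nat) : Int) by push_cast; ring]
      rw [PySem.List.pyGetD_natCast, PySem.List.pyGetD_natCast]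
      simpa [pvAdjB] using h4 j (by omega)


def pvAdjList (seqs : List String) : List Bool := List.zipWith pvAdjB seqs seqs.tail

-- B's per-op acceptance condition, with infos entries written as pvB_info of the stage
def pvCondB (seqs : List String) (nmb : Int) (iw : Bool) (j : Nat) (op : Char) : Bool :=
  pvCandOk nmb iw (pvB_info iw ((seqs.getD j "").toList)) op &&
  !(decide (0 < j) &&
    !(decide (((pvB_info iw ((seqs.getD j "").toList)).cf : Int) + (if op = 'f' then 1 else 0) ≤
        ((pvB_info iw ((seqs.getD (j - 1) "").toList)).cf : Int)) &&
      decide (((pvB_info iw ((seqs.getD (j - 1) "").toList)).cb : Int) ≤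
        ((pvB_info iw ((seqs.getD j "").toList)).cb : Int) + (if op = 'b' then 1 else 0)))) &&
  !(decide (j + 1 < seqs.length) &&
    !(decide (((pvB_info iw ((seqs.getD (j + 1) "").toList)).cf : Int) ≤
        ((pvB_info iw ((seqs.getD j "").toList)).cf : Int) + (if op = 'f' then 1 else 0)) &&
      decide (((pvB_info iw ((seqs.getD j "").toList)).cb : Int) + (if op = 'b' then 1 else 0) ≤
        ((pvB_info iw ((seqs.getD (j + 1) "").toList)).cb : Int))))

theorem pv_set_getD (seqs : List String) (j : Nat) (x : String) (k : Nat)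
    (hk : k < seqs.length) (hj : j < seqs.length) :
    (seqs.set j x).getD k "" = if k = j then x else seqs.getD k "" := by
  rw [List.getD_eq_getElem _ _ (by simpa using hk), List.getElem_set]
  by_cases h : j = k
  · subst h; simp
  · rw [if_neg h, if_neg (fun hh => h hh.symm), List.getD_eq_getElem _ _ hk]

theorem pv_adjList_length (seqs : List String) : (pvAdjList seqs).length = seqs.length - 1 := by
  simp [pvAdjList]

theorem pv_adjList_getElem (seqs : List String) (k : Nat) (hk : k < seqs.length - 1) :
    (pvAdjList seqs)[k]'(by rw [pv_adjList_length]; omega) =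
      pvAdjB (seqs.getD k "") (seqs.getD (k + 1) "") := by
  simp only [pvAdjList, List.getElem_zipWith]
  rw [List.getElem_tail, List.getD_eq_getElem _ _ (by omega), List.getD_eq_getElem _ _ (by omega)]

-- the function Source B folds into okP/okS, pointwise equal to A's per-sequence validation
theorem pv_baseOk_funext (nmb : Int) (iw : Bool) :
    (fun s : String => pvB_baseOk nmb iw (pvB_info iw s.toList)) = pvSeqOk nmb iw := by
  funext s
  exact (pv_seqValid_eq_baseOk nmb iw s.toList).symm

theorem pv_okP_bridge (seqs : List String) (nmb : Int) (iw : Bool) (j : Nat) (hj : j ≤ seqs.length) :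
    (List.scanl (fun a t => a && pvB_baseOk nmb iw t) true
        (seqs.map (fun s => pvB_info iw s.toList))).getD j true
      = (seqs.take j).all (pvSeqOk nmb iw) := by
  rw [pv_scanl_getD (pvB_baseOk nmb iw) _ j true (by simpa using hj), Bool.true_and,
    ← List.map_take, List.all_map]
  rw [show ((pvB_baseOk nmb iw) ∘ (fun s : String => pvB_info iw s.toList)) = pvSeqOk nmb iw from
    (pv_baseOk_funext nmb iw)]

theorem pv_okS_bridge (seqs : List String) (nmb : Int) (iw : Bool) (j : Nat) (hj : j ≤ seqs.length) :
    ((List.scanl (fun a t => a && pvB_baseOk nmb iw t) true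
        (seqs.map (fun s => pvB_info iw s.toList)).reverse).reverse).getD j true
      = (seqs.drop j).all (pvSeqOk nmb iw) := by
  rw [pv_scanl_rev_getD (pvB_baseOk nmb iw) _ j (by simpa using hj),
    ← List.map_drop, List.all_map]
  rw [show ((pvB_baseOk nmb iw) ∘ (fun s : String => pvB_info iw s.toList)) = pvSeqOk nmb iw from
    (pv_baseOk_funext nmb iw)]

theorem pv_adj_eq (seqs : List String) (iw : Bool) :
    List.zipWith (fun p q : PvInfo => decide ((q.cf : Int) ≤ (p.cf : Int)) && decide ((p.cb : Int) ≤ (q.cb : Int)))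
        (seqs.map (fun s => pvB_info iw s.toList)) (seqs.map (fun s => pvB_info iw s.toList)).tail
      = pvAdjList seqs := by
  rw [← List.map_tail, List.zipWith_map]
  rfl

theorem pv_adjP_bridge (l : List Bool) (k : Nat) (hk : k ≤ l.length) :
    (List.scanl (fun a x => a && x) true l).getD k true = (l.take k).all (fun x => x) := by
  simpa using pv_scanl_getD (fun x => x) l k true hk

theorem pv_adjS_bridge (l : List Bool) (k : Nat) (hk : k ≤ l.length + 1) :
    ((List.scanl (fun a x => a && x) true l.reverse).reverse ++ [true]).getD k true
      = (l.drop k).all (fun x => x) := by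
  by_cases h : k ≤ l.length
  · rw [List.getD_append _ _ _ _ (by simp [List.length_scanl]; omega)]
    simpa using pv_scanl_rev_getD (fun x => x) l k h
  · have hk1 : k = l.length + 1 := by omega
    subst hk1
    rw [List.getD_append_right _ _ _ _ (by simp [List.length_scanl])]
    simp [List.length_scanl, List.drop_eq_nil_of_le (by omega : l.length ≤ l.length + 1)]

-- what A builds at stage j equals the take/push/drop form B builds
theorem pv_mod_eq (seqs : List String) (j : Nat) (hj : j < seqs.length) (op : Char) :
    (PySem.List.pySetD (seqs.map String.toList) (j : Int)
        ((PySem.List.pyGetD (seqs.map String.toList) (j : Int) []) ++ [op])).map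
      (fun l => String.ofList l)
      = seqs.set j ((seqs.getD j "").push op) := by
  rw [PySem.List.pySetD_natCast, PySem.List.pyGetD_natCast,
    PySem.List.getD_map_of_lt _ _ _ _ hj]
  have h1 : seqs[j].toList ++ [op] = ((seqs.getD j "").push op).toList := by
    rw [String.toList_push, List.getD_eq_getElem _ _ hj]
  rw [h1, ← List.map_set, List.map_map]
  rw [show ((fun l : List Char => String.ofList l) ∘ String.toList) = id from
    funext (fun s => String.ofList_toList)]
  rw [List.map_id]


theorem pv_info_cf (iw : Bool) (t : List Char) : (pvB_info iw t).cf = t.count 'f' := rfl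
theorem pv_info_cb (iw : Bool) (t : List Char) : (pvB_info iw t).cb = t.count 'b' := rfl

theorem pv_adjB_push_right (p q : String) (op : Char) :
    pvAdjB p (q.push op) =
      (decide (((q.toList.count 'f' : Int) + (if op = 'f' then 1 else 0)) ≤ (p.toList.count 'f' : Int)) &&
       decide ((p.toList.count 'b' : Int) ≤ (q.toList.count 'b' : Int) + (if op = 'b' then 1 else 0))) := by
  unfold pvAdjB
  rw [String.toList_push]
  simp only [List.count_append, List.count_singleton']
  push_cast [apply_ite (fun n : Nat => (n : Int))]
  rfl

theorem pv_adjB_push_left (p q : String) (op : Char) :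
    pvAdjB (p.push op) q =
      (decide ((q.toList.count 'f' : Int) ≤ (p.toList.count 'f' : Int) + (if op = 'f' then 1 else 0)) &&
       decide (((p.toList.count 'b' : Int) + (if op = 'b' then 1 else 0)) ≤ (q.toList.count 'b' : Int))) := by
  unfold pvAdjB
  rw [String.toList_push]
  simp only [List.count_append, List.count_singleton']
  push_cast [apply_ite (fun n : Nat => (n : Int))]
  rfl

-- the centerpiece: A's full revalidation of the candidate at stage j equals
-- B's precomputed stage conditions plus the O(1) incremental checks
theorem pv_pred_eq (seqs : List String) (nmb : Int) (iw : Bool) (j : Nat) (hj : j < seqs.length)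
    (op : Char) (hop : op ∈ pvOps iw) :
    pvA_isValid (seqs.set j ((seqs.getD j "").push op)) nmb (seqs.length : Int) iw =
      ((seqs.take j).all (pvSeqOk nmb iw) &&
       (seqs.drop (j + 1)).all (pvSeqOk nmb iw) &&
       (pvB_info iw ((seqs.getD j "").toList)).charsOk &&
       (pvB_info iw ((seqs.getD j "").toList)).dep &&
       ((pvAdjList seqs).take (j - 1)).all (fun x => x) &&
       ((pvAdjList seqs).drop (j + 1)).all (fun x => x) &&
       pvCondB seqs nmb iw j op) := by
  have hx : pvSeqOk nmb iw ((seqs.getD j "").push op) =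
      ((pvB_info iw ((seqs.getD j "").toList)).charsOk &&
       (pvB_info iw ((seqs.getD j "").toList)).dep &&
       pvCandOk nmb iw (pvB_info iw ((seqs.getD j "").toList)) op) := by
    unfold pvSeqOk
    rw [String.toList_push]
    exact pv_seqValid_append nmb iw _ op hop
  rw [Bool.eq_iff_iff, pv_valid_iff seqs nmb iw j hj _]
  simp only [Bool.and_eq_true]
  constructor
  · rintro ⟨h1, h2, h3, h4⟩
    rw [hx] at h3
    simp only [Bool.and_eq_true] at h3
    obtain ⟨⟨hchars, hdep⟩, hcand⟩ := h3
    refine ⟨⟨⟨⟨⟨⟨h1, h2⟩, hchars⟩, hdep⟩, ?_⟩, ?_⟩, ?_⟩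
    · rw [pv_all_take_iff]
      intro k hk hkj
      rw [pv_adjList_length] at hk
      rw [pv_adjList_getElem seqs k hk]
      have h5 := h4 k (by omega)
      rw [pv_set_getD _ _ _ _ (by omega) hj, pv_set_getD _ _ _ _ (by omega) hj,
        if_neg (by omega), if_neg (by omega)] at h5
      exact h5
    · rw [pv_all_drop_iff]
      intro k hk hkj
      rw [pv_adjList_length] at hk
      rw [pv_adjList_getElem seqs k hk]
      have h5 := h4 k (by omega)
      rw [pv_set_getD _ _ _ _ (by omega) hj, pv_set_getD _ _ _ _ (by omega) hj,
        if_neg (by omega), if_neg (by omega)] at h5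
      exact h5
    · simp only [pvCondB, Bool.and_eq_true]
      refine ⟨⟨hcand, ?_⟩, ?_⟩
      · by_cases h0 : 0 < j
        · have h5 := h4 (j - 1) (by omega)
          rw [pv_set_getD _ _ _ _ (by omega) hj, pv_set_getD _ _ _ _ (by omega) hj,
            if_neg (by omega), if_pos (by omega)] at h5
          rw [pv_adjB_push_right] at h5
          simp only [Bool.and_eq_true, decide_eq_true_eq] at h5
          simp only [List.getD_eq_getElem?_getD] at h5
          simp [pv_info_cf, pv_info_cb, h5.1, h5.2]
        · simp [h0]
      · by_cases hr : j + 1 < seqs.length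
        · have h5 := h4 j (by omega)
          rw [pv_set_getD _ _ _ _ (by omega) hj, pv_set_getD _ _ _ _ (by omega) hj,
            if_pos rfl, if_neg (by omega)] at h5
          rw [pv_adjB_push_left] at h5
          simp only [Bool.and_eq_true, decide_eq_true_eq] at h5
          simp only [List.getD_eq_getElem?_getD] at h5
          simp [pv_info_cf, pv_info_cb, h5.1, h5.2]
        · simp [hr]
  · rintro ⟨⟨⟨⟨⟨⟨h1, h2⟩, hchars⟩, hdep⟩, hC1⟩, hC2⟩, hCB⟩
    simp only [pvCondB, Bool.and_eq_true] at hCB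
    obtain ⟨⟨hcand, hL⟩, hR⟩ := hCB
    refine ⟨h1, h2, ?_, ?_⟩
    · rw [hx]
      simp only [Bool.and_eq_true]
      exact ⟨⟨hchars, hdep⟩, hcand⟩
    · intro k hk
      rw [pv_set_getD _ _ _ _ (by omega) hj, pv_set_getD _ _ _ _ (by omega) hj]
      by_cases hkj : k = j
      · subst hkj
        rw [if_pos rfl, if_neg (by omega)]
        rw [pv_adjB_push_left]
        simp only [pv_info_cf, pv_info_cb, (by omega : k + 1 < seqs.length), decide_true,
          Bool.true_and, Bool.not_not, Bool.and_eq_true, decide_eq_true_eq] at hR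
        simp only [List.getD_eq_getElem?_getD] at hR ⊢
        simp [hR.1, hR.2]
      · by_cases hk1j : k + 1 = j
        · have hk1 : k = j - 1 := by omega
          rw [if_neg hkj, if_pos hk1j]
          rw [pv_adjB_push_right]
          simp only [pv_info_cf, pv_info_cb, (by omega : 0 < j), decide_true,
            Bool.true_and, Bool.not_not, Bool.and_eq_true, decide_eq_true_eq] at hL
          subst hk1
          simp only [List.getD_eq_getElem?_getD] at hL ⊢
          simp [hL.1, hL.2]
        · rw [if_neg hkj, if_neg hk1j]
          rcases Nat.lt_or_ge k j with hlt | hge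
          · have hkj1 : k < j - 1 := by omega
            rw [pv_all_take_iff] at hC1
            have h5 := hC1 k (by rw [pv_adjList_length]; omega) hkj1
            rw [pv_adjList_getElem seqs k (by omega)] at h5
            exact h5
          · have hkge : j + 1 ≤ k := by omega
            rw [pv_all_drop_iff] at hC2
            have h5 := hC2 k (by rw [pv_adjList_length]; omega) hkge
            rw [pv_adjList_getElem seqs k (by omega)] at h5
            exact h5


theorem pv_infos_getD (seqs : List String) (iw : Bool) (k : Nat) (hk : k < seqs.length) :
    (seqs.map (fun s => pvB_info iw s.toList)).getD k default = pvB_info iw ((seqs.getD k "").toList) := by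
  rw [PySem.List.getD_map_of_lt _ _ _ _ hk, List.getD_eq_getElem _ _ hk]

theorem pv_out_eq (seqs : List String) (j : Nat) (hj : j < seqs.length) (op : Char) :
    seqs.take j ++ [(seqs.getD j "").push op] ++ seqs.drop (j + 1) =
      seqs.set j ((seqs.getD j "").push op) := by
  rw [List.set_eq_take_cons_drop _ hj]
  simp

theorem pv_chain6 {α : Type} (c1 c2 c3 c4 c5 c6 : Bool) (v : α) :
    (if c1 then (none : Option α) else if c2 then none else if c3 then none else if c4 then none
     else if c5 then none else if c6 then none else some v)
    = (if ((!c1 && !c2 && !c3 && !c4) && !c5) && !c6 then some v else none) := by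
  cases c1 <;> cases c2 <;> cases c3 <;> cases c4 <;> cases c5 <;> cases c6 <;> simp

theorem pv_main (seqs : List String) (nmb : Int) (nst : Int) (iw : Bool) :
    find_successors seqs nmb nst iw = find_successors_alt seqs nmb nst iw := by
  by_cases hn : ((seqs.length : Int)) = nst
  · subst hn
    unfold find_successors find_successors_alt
    rw [if_neg (show ¬((seqs.length : Int) ≠ (seqs.length : Int)) by simp)]
    rw [PySem.List.pyRange_zero_nat, List.foldl_map]
    apply PySem.List.foldl_congr_mem
    intro acc j hjmem
    have hj : j < seqs.length := List.mem_range.mp hjmem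
    have hops : (if iw then ['f', 'b'] else ['f', 'b', 'w']) = pvOps iw := rfl
    simp only [pv_mod_eq seqs j hj]
    rw [PySem.List.foldl_append_if]
    rw [pv_okP_bridge seqs nmb iw j (by omega), pv_okS_bridge seqs nmb iw (j + 1) (by omega),
      pv_adj_eq seqs iw, pv_adjP_bridge _ (j - 1) (by rw [pv_adjList_length]; omega),
      pv_adjS_bridge _ (j + 1) (by rw [pv_adjList_length]; omega),
      pv_infos_getD seqs iw j hj, pv_infos_getD seqs iw (j - 1) (by omega), hops]
    cases hc1 : ((seqs.take j).all (pvSeqOk nmb iw) && (seqs.drop (j + 1)).all (pvSeqOk nmb iw) &&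
        (pvB_info iw ((seqs.getD j "").toList)).charsOk &&
        (pvB_info iw ((seqs.getD j "").toList)).dep) with
    | false =>
      rw [if_pos (by simp [hc1])]
      have hpred : ∀ op ∈ pvOps iw,
          pvA_isValid (seqs.set j ((seqs.getD j "").push op)) nmb (seqs.length : Int) iw = false := by
        intro op hop
        rw [pv_pred_eq seqs nmb iw j hj op hop, hc1]
        simp
      rw [List.filter_congr hpred]
      simp
    | true =>
      cases hc2 : (((pvAdjList seqs).take (j - 1)).all (fun x => x) &&
          ((pvAdjList seqs).drop (j + 1)).all (fun x => x)) with
      | false =>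
        rw [if_neg (by simp [hc1]), if_pos (by simp [hc2])]
        have hpred : ∀ op ∈ pvOps iw,
            pvA_isValid (seqs.set j ((seqs.getD j "").push op)) nmb (seqs.length : Int) iw = false := by
          intro op hop
          rw [pv_pred_eq seqs nmb iw j hj op hop]
          rcases Bool.and_eq_false_iff.mp hc2 with h | h <;> rw [h] <;> simp
        rw [List.filter_congr hpred]
        simp
      | true =>
        rw [if_neg (by simp [hc1]), if_neg (by simp [hc2])]
        have hpred : ∀ op ∈ pvOps iw,
            pvA_isValid (seqs.set j ((seqs.getD j "").push op)) nmb (seqs.length : Int) iw =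
              pvCondB seqs nmb iw j op := by
          intro op hop
          rw [pv_pred_eq seqs nmb iw j hj op hop]
          rw [Bool.and_eq_true, Bool.and_eq_true, Bool.and_eq_true] at hc1
          obtain ⟨⟨⟨e1, e2⟩, e3⟩, e4⟩ := hc1
          rw [Bool.and_eq_true] at hc2
          obtain ⟨f1, f2⟩ := hc2
          rw [e1, e2, e3, e4, f1, f2]
          simp
        rw [List.filter_congr hpred]
        congr 1
        rw [← pv_filterMap_ite]
        apply List.filterMap_congr
        intro op hop
        simp only [pv_out_eq seqs j hj]
        by_cases hr : j + 1 < seqs.length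
        · rw [pv_infos_getD seqs iw (j + 1) hr, pv_chain6]
          simp only [pvCondB, pvCandOk]
          rfl
        · rw [pv_chain6]
          simp [pvCondB, pvCandOk, hr]
  · have hB : find_successors_alt seqs nmb nst iw = [] := by
      unfold find_successors_alt
      rw [if_pos hn]
    rw [hB]
    unfold find_successors
    apply pv_foldl_fixed
    intro acc stage _
    apply pv_foldl_fixed
    intro acc2 op _
    rw [if_neg]
    intro hval
    unfold pvA_isValid at hval
    rw [if_pos (by simpa [PySem.List.length_pySetD] using hn)] at hval
    exact Bool.false_ne_true hval

-- ===== VERDICT (by name: the statement is the Claim_ definition above) =====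
theorem find_successors_spec : Claim_equal_find_successors := by
  intro seqs nmb nst iw _ _
  unfold Spec_find_successors
  exact pv_main seqs nmb nst iw
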